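-- pv_equiv track=rewrite | github.com/SakuraOneLove/DSP-2020 | extrafuncs.py | bit_grid
-- ===== SOURCE A (Python) =====
-- def dec2bin(dec: int, bitdepth=None) -> str:
--     """Перевод чисел из десятичой СС
--     в шестандцатиричную, с учётом разрядной сетки
--     и без учёта знака числа.
--     bitdepth - ширина разрядной сетки.
--     """
--     bin_num = "{:b}".format(abs(dec))
--     if bitdepth is None:
--         res = bin_num
--     else:
--         if (anum:=bitdepth - len(bin_num)) > 0:
--             res = '0' * anum + bin_num
--         else:
--             res = bin_num
--     return res
--
-- def bit_grid(min_num: int, max_num: int, /) -> int: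
--     """Определение разрядной сетки для чисел
--     со знаком.
--     """
--     # Начальное приближени размера сетки
--     appr = len(dec2bin(max_num))
--     grid_size = 2 ** (appr - 1)
--     # Расчёт размера сетки
--     while not ((min_num in range(-grid_size, grid_size))\
--     and (max_num in range(-grid_size, grid_size))):
--         appr += 1
--         grid_size = 2 ** (appr - 1)
--     return appr
-- ===== SOURCE B (Python) =====
-- def bit_grid(min_num: int, max_num: int, /) -> int:
--     """Closed-form signed bit-grid width: no loop."""
--     # smallest g = 2**(n-1) must satisfy -g <= x < g for both numbers
--     K = max(min_num + 1, max_num + 1, -min_num, -max_num)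
--     needed = 1 if K <= 1 else (K - 1).bit_length() + 1
--     # the loop starts at len(bin(|max_num|)), so the result never drops below it
--     return max(1, abs(max_num).bit_length(), needed)
-- ===== Notes on version B (the rewrite author's own statement) =====
-- stated objective: simpler
-- what changed: Replaces A's widening while-loop (increment appr until both numbers fit in range(-2**(appr-1), 2**(appr-1))) with a closed-form bit_length computation of the required width, combined with the loop's start value via max.
import Mathlib
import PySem

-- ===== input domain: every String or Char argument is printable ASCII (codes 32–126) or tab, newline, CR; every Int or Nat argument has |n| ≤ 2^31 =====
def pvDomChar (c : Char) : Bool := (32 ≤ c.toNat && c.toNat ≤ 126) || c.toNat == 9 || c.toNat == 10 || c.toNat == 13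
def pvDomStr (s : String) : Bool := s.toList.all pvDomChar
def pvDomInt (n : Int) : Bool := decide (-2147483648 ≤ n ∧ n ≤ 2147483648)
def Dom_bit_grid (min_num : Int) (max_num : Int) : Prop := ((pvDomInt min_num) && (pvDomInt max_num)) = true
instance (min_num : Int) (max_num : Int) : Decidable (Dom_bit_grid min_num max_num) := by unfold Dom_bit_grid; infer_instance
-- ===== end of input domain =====

-- B replaces A's widening while-loop by a closed-form bit_length computation (simpler; same result on all inputs).

-- ===== PORT A =====
-- "{:b}".format(n) for n : Nat (digits of n in binary, most significant first; [] for 0 — the caller adds "0")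
def pvBinChars (n : Nat) : List Char :=
  if h : n = 0 then [] else pvBinChars (n / 2) ++ [if n % 2 = 1 then '1' else '0']
decreasing_by exact Nat.div_lt_self (Nat.pos_of_ne_zero h) (by norm_num)

-- dec2bin from A's module, on the string's character list ("{:b}".format(abs(dec)) then optional zero-padding)
def dec2bin (dec : Int) (bitdepth : Option Int) : List Char :=
  let bin_num := if dec = 0 then ['0'] else pvBinChars dec.natAbs
  match bitdepth with
  | none => bin_num
  | some bd =>
      let anum := bd - (bin_num.length : Int)
      if anum > 0 then List.replicate anum.toNat '0' ++ bin_num else bin_num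

-- A's while-loop: appr += 1 until both numbers fit in range(-2**(appr-1), 2**(appr-1)).
-- The fuel argument is only a totality guard (bitGridLoop_fuel_enough below proves it is never exhausted).
def bitGridLoop (min_num max_num : Int) (fuel : Nat) (appr : Nat) : Nat :=
  match fuel with
  | 0 => appr
  | fuel + 1 =>
    let grid_size : Int := 2 ^ (appr - 1)
    if (-grid_size ≤ min_num ∧ min_num < grid_size) ∧ (-grid_size ≤ max_num ∧ max_num < grid_size)
    then appr
    else bitGridLoop min_num max_num fuel (appr + 1)

def bit_grid (min_num : Int) (max_num : Int) : Int :=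
  ((bitGridLoop min_num max_num (min_num.natAbs + max_num.natAbs + 2)
      (dec2bin max_num none).length : Nat) : Int)

-- ===== PORT B =====
def bit_grid_alt (min_num : Int) (max_num : Int) : Int :=
  let K : Int := max (max (min_num + 1) (max_num + 1)) (max (-min_num) (-max_num))
  let needed : Int := if K ≤ 1 then 1 else ((PySem.Int.bitLength (K - 1) : Nat) : Int) + 1
  max (max 1 ((PySem.Int.bitLength max_num : Nat) : Int)) needed

-- ===== PRECONDITION & SPEC =====
def Spec_bit_grid (min_num : Int) (max_num : Int) (out : Int) : Prop := out = bit_grid_alt min_num max_num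
instance (min_num : Int) (max_num : Int) (out : Int) : Decidable (Spec_bit_grid min_num max_num out) := by unfold Spec_bit_grid; infer_instance

-- ===== CLAIM (what is proved, stated in full; the proofs are below) =====
def Claim_equal_bit_grid : Prop := ∀ (min_num : Int) (max_num : Int), Dom_bit_grid min_num max_num → Spec_bit_grid min_num max_num (bit_grid min_num max_num)

-- ===== LEMMAS AND PROOFS =====

theorem pvBinChars_length (n : Nat) (h : 0 < n) :
    (pvBinChars n).length = PySem.Int.bitLength (n : Int) := by
  induction n using Nat.strong_induction_on with
  | _ n ih =>
    rw [pvBinChars, dif_neg (by omega : ¬ n = 0)]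
    rw [PySem.Int.bitLength_natCast (by omega : 0 < n)]
    by_cases h2 : n / 2 = 0
    · simp [h2, pvBinChars]
    · simp [List.length_append, ih (n / 2) (by omega) (by omega)]

theorem pv_one_le_bitLength (m : Int) (hm : m ≠ 0) : 1 ≤ PySem.Int.bitLength m := by
  have h1 := PySem.Int.lt_two_pow_bitLength m
  by_contra h
  have : PySem.Int.bitLength m = 0 := by omega
  rw [this] at h1
  simp at h1
  omega

theorem dec2bin_length (m : Int) :
    (dec2bin m none).length = max 1 (PySem.Int.bitLength m) := by
  unfold dec2bin
  by_cases h : m = 0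
  · simp [h, PySem.Int.bitLength_zero]
  · have hcast : PySem.Int.bitLength ((m.natAbs : Nat) : Int) = PySem.Int.bitLength m := by
      by_cases hm : 0 ≤ m
      · rw [Int.natAbs_of_nonneg hm]
      · have : ((m.natAbs : Nat) : Int) = -m := by omega
        rw [this, PySem.Int.bitLength_neg]
    rw [if_neg h]
    rw [pvBinChars_length m.natAbs (by omega), hcast,
      Nat.max_eq_right (pv_one_le_bitLength m h)]

-- the loop condition at width n is exactly K ≤ 2^(n-1)
theorem pvCond_iff (min_num max_num : Int) (n : Nat) :
    (((-(2 ^ (n - 1) : Int) ≤ min_num ∧ min_num < (2 ^ (n - 1) : Int)) ∧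
      (-(2 ^ (n - 1) : Int) ≤ max_num ∧ max_num < (2 ^ (n - 1) : Int)))
      ↔ max (max (min_num + 1) (max_num + 1)) (max (-min_num) (-max_num)) ≤ (2 ^ (n - 1) : Int)) := by
  simp only [max_le_iff]
  omega

-- |m| < 2^e iff m fits in e bits
theorem pv_natAbs_lt_iff (m : Int) (hm : m ≠ 0) (e : Nat) :
    (m.natAbs < 2 ^ e) ↔ PySem.Int.bitLength m ≤ e := by
  constructor
  · intro hlt
    by_contra hgt
    have h1 := PySem.Int.two_pow_bitLength_le m hm
    have h2 : 2 ^ e ≤ 2 ^ (PySem.Int.bitLength m - 1) :=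
      Nat.pow_le_pow_right (by norm_num) (by omega)
    omega
  · intro hle
    have h1 := PySem.Int.lt_two_pow_bitLength m
    have h2 : (2 : Nat) ^ PySem.Int.bitLength m ≤ 2 ^ e :=
      Nat.pow_le_pow_right (by norm_num) hle
    omega

-- K ≤ 2^(n-1) iff B's closed-form width fits in n (n ≥ 1)
theorem pvNeeded_iff (K : Int) (n : Nat) (hn : 1 ≤ n) :
    (K ≤ (2 ^ (n - 1) : Int)) ↔ ((if K ≤ 1 then 1 else PySem.Int.bitLength (K - 1) + 1) ≤ n) := by
  have hp : (0 : Int) < 2 ^ (n - 1) := by positivity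
  split_ifs with hK
  · constructor
    · intro _; exact hn
    · intro _; omega
  · have hK2 : 2 ≤ K := by omega
    have hne : K - 1 ≠ 0 := by omega
    have h1 := pv_natAbs_lt_iff (K - 1) hne (n - 1)
    have hcast : ((K - 1).natAbs < 2 ^ (n - 1)) ↔ (K - 1 : Int) < (2 ^ (n - 1) : Int) := by
      have h2 : (((K - 1).natAbs : Nat) : Int) = K - 1 := by omega
      have h3 : (((2 : Nat) ^ (n - 1) : Nat) : Int) = (2 : Int) ^ (n - 1) := by push_cast; ring
      rw [← Nat.cast_lt (α := Int), h2, h3]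
    rw [hcast] at h1
    omega

theorem bitGridLoop_eq_max (min_num max_num : Int) (needed : Nat)
    (hiff : ∀ n : Nat, 1 ≤ n →
      ((((-(2 ^ (n - 1) : Int) ≤ min_num ∧ min_num < (2 ^ (n - 1) : Int)) ∧
        (-(2 ^ (n - 1) : Int) ≤ max_num ∧ max_num < (2 ^ (n - 1) : Int)))) ↔ needed ≤ n)) :
    ∀ (fuel a : Nat), 1 ≤ a → needed < fuel + a →
      bitGridLoop min_num max_num fuel a = max a needed := by
  intro fuel
  induction fuel with
  | zero =>
    intro a _ hd
    show a = max a needed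
    omega
  | succ fuel ih =>
    intro a ha hd
    show (if _ then a else bitGridLoop min_num max_num fuel (a + 1)) = max a needed
    by_cases hle : needed ≤ a
    · rw [if_pos ((hiff a ha).mpr hle)]
      omega
    · rw [if_neg (fun hc => hle ((hiff a ha).mp hc))]
      rw [ih (a + 1) (by omega) (by omega)]
      omega

-- the chosen fuel always exceeds the closed-form width B computes
theorem bitGridLoop_fuel_enough (min_num max_num : Int) :
    (if max (max (min_num + 1) (max_num + 1)) (max (-min_num) (-max_num)) ≤ 1 then 1
     else PySem.Int.bitLength
       (max (max (min_num + 1) (max_num + 1)) (max (-min_num) (-max_num)) - 1) + 1)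
      ≤ min_num.natAbs + max_num.natAbs + 2 := by
  set K : Int := max (max (min_num + 1) (max_num + 1)) (max (-min_num) (-max_num)) with hKdef
  split_ifs with hK
  · omega
  · have hne : K - 1 ≠ 0 := by omega
    have h1 : PySem.Int.bitLength (K - 1) - 1 < 2 ^ (PySem.Int.bitLength (K - 1) - 1) :=
      Nat.lt_two_pow_self
    have h2 := PySem.Int.two_pow_bitLength_le (K - 1) hne
    have h3 : PySem.Int.bitLength (K - 1) ≤ (K - 1).natAbs := by omega
    have h4 : K ≤ (min_num.natAbs : Int) + (max_num.natAbs : Int) + 1 := by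
      rw [hKdef]; omega
    omega

-- ===== VERDICT (by name: the statement is the Claim_ definition above) =====
theorem bit_grid_spec : Claim_equal_bit_grid := by
  intro min_num max_num _
  unfold Spec_bit_grid bit_grid bit_grid_alt
  set K : Int := max (max (min_num + 1) (max_num + 1)) (max (-min_num) (-max_num)) with hKdef
  set neededN : Nat := if K ≤ 1 then 1 else PySem.Int.bitLength (K - 1) + 1 with hNdef
  have hiff : ∀ n : Nat, 1 ≤ n →
      ((((-(2 ^ (n - 1) : Int) ≤ min_num ∧ min_num < (2 ^ (n - 1) : Int)) ∧
        (-(2 ^ (n - 1) : Int) ≤ max_num ∧ max_num < (2 ^ (n - 1) : Int)))) ↔ neededN ≤ n) := by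
    intro n hn
    rw [pvCond_iff min_num max_num n, ← hKdef, pvNeeded_iff K n hn, hNdef]
  have ha : 1 ≤ (dec2bin max_num none).length := by
    rw [dec2bin_length]; omega
  have hfuel : neededN < (min_num.natAbs + max_num.natAbs + 2) + (dec2bin max_num none).length := by
    have := bitGridLoop_fuel_enough min_num max_num
    rw [← hKdef, ← hNdef] at this
    omega
  rw [bitGridLoop_eq_max min_num max_num neededN hiff _ _ ha hfuel, dec2bin_length]
  rw [hNdef]
  split_ifs with hK
  · push_cast; omega
  · push_cast; omega
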